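-- pv_equiv track=rewrite | github.com/phan228/DPLL | dpll.py | pure_literal
-- ===== SOURCE A (Python) =====
-- def simplify(cnf, p):
-- 	new_cnf = []
--
-- 	if type(p) is list:
-- 		p = int((''.join(map(str,p))))
--
-- 	for clause in cnf:
-- 		if p in clause:
-- 			continue		# ignore/ dont add the clauses that contain p
-- 		if -p in clause:
-- 			c = [x for x in clause if x != -p]	# delete occurences of -p in clauses
-- 			if len(c) == 0:		# the case where p is true and -p is a unit clause
-- 				return -1		# which means p is True and False -> conflict
-- 			new_cnf.append(c)
-- 		else:
-- 			new_cnf.append(clause)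
--
-- 	return new_cnf
--
-- def occurences(cnf):
-- 	occurences = {}		# map of { "x1: # of currences", "x2: # of currences",...}
--
-- 	for clause in cnf:
-- 		for x in clause:
-- 			if x in occurences:
-- 				occurences[x] += 1
-- 			else:
-- 				occurences[x] = 1
--
-- 	return occurences
--
-- def pure_literal(cnf):
-- 	count = occurences(cnf)
-- 	pure_literals = []
--
-- 	for x, times in count.items():
-- 		if -x not in count:
-- 			pure_literals.append(x)
--
-- 	for x in pure_literals:
-- 		cnf = simplify(cnf, x)
--
-- 	return cnf, pure_literals
-- ===== SOURCE B (Python) =====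
-- def pure_literal(cnf):
--     lits = []            # distinct literals in first-appearance order
--     litset = set()
--     for clause in cnf:
--         for x in clause:
--             if x not in litset:
--                 litset.add(x)
--                 lits.append(x)
--     pure_literals = [x for x in lits if -x not in litset]
--     pure_set = set(pure_literals)
--     new_cnf = [clause for clause in cnf if pure_set.isdisjoint(clause)]
--     return new_cnf, pure_literals
-- ===== Notes on version B (the rewrite author's own statement) =====
-- stated objective: faster
-- what changed: A runs a full simplify pass over the whole CNF once per pure literal after building an occurrence-count dict; B makes one scan collecting the distinct literals in first-appearance order, filters them for purity, and removes all affected clauses in a single filter pass.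
import Mathlib
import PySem

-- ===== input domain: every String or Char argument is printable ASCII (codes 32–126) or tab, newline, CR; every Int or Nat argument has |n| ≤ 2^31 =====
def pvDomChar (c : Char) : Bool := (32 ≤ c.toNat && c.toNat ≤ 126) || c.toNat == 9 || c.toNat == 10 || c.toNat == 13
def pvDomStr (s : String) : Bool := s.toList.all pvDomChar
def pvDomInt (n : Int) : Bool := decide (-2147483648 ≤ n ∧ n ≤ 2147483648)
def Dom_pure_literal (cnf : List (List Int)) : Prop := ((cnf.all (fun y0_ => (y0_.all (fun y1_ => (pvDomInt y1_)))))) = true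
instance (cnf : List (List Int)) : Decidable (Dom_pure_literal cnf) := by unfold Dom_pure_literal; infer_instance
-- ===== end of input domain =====

-- B replaces A's one-simplify-pass-over-the-CNF-per-pure-literal with a single literal scan plus one filter pass (same return value).

-- ===== PORT A =====
-- simplify(cnf, p) for an int p (the `type(p) is list` branch never fires: pure_literal passes ints);
-- Python's mid-loop `return -1` (conflict) is `none` here.
def simplifyA (cnf : List (List Int)) (p : Int) : Option (List (List Int)) :=
  cnf.foldl (fun acc clause =>
    acc.bind (fun new_cnf =>
      if p ∈ clause then some new_cnf
      else if -p ∈ clause then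
        let c := clause.filter (fun x => x ≠ -p)
        if c.length = 0 then none else some (new_cnf ++ [c])
      else some (new_cnf ++ [clause]))) (some [])

def occurencesA (cnf : List (List Int)) : PySem.Dict Int Int :=
  cnf.foldl (fun occ clause =>
    clause.foldl (fun occ x =>
      if occ.contains x then occ.insert x (occ.getD x 0 + 1) else occ.insert x 1) occ)
    PySem.Dict.empty

def pure_literal (cnf : List (List Int)) : List (List Int) × List Int :=
  let count := occurencesA cnf
  let pure_literals := count.items.foldl
    (fun acc xt => if ¬ count.contains (-xt.1) then acc ++ [xt.1] else acc) []
  let cnf' := pure_literals.foldl (fun st x => st.bind (fun c => simplifyA c x)) (some cnf)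
  -- `.getD []` is unreachable: simplify never reaches the conflict result for a pure literal (proved below)
  (cnf'.getD [], pure_literals)

-- ===== PORT B =====
def pure_literal_alt (cnf : List (List Int)) : List (List Int) × List Int :=
  -- lits models Source B's (lits, litset) pair: the distinct literals in first-appearance order
  let lits : PySem.Set Int := cnf.foldl (fun s clause => PySem.Set.update s clause) PySem.Set.empty
  let pure_literals := lits.filter (fun x => !(PySem.Set.contains lits (-x)))
  let pure_set := PySem.Set.ofList pure_literals
  let new_cnf := cnf.filter (fun clause => PySem.Set.isdisjoint pure_set clause)
  (new_cnf, pure_literals)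

-- ===== PRECONDITION & SPEC =====
def Spec_pure_literal (cnf : List (List Int)) (out : List (List Int) × List Int) : Prop := out = pure_literal_alt cnf
instance (cnf : List (List Int)) (out : List (List Int) × List Int) : Decidable (Spec_pure_literal cnf out) := by unfold Spec_pure_literal; infer_instance

-- ===== CLAIM (what is proved, stated in full; the proofs are below) =====
def Claim_equal_pure_literal : Prop := ∀ (cnf : List (List Int)), Dom_pure_literal cnf → Spec_pure_literal cnf (pure_literal cnf)

-- ===== LEMMAS AND PROOFS =====

-- A's counting step is an insert in both branches (the value inserted differs)
lemma occ_step_eq : (fun (occ : PySem.Dict Int Int) (x : Int) =>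
      if occ.contains x then occ.insert x (occ.getD x 0 + 1) else occ.insert x 1)
      = fun occ x => occ.insert x (if occ.contains x then occ.getD x 0 + 1 else 1) := by
  funext occ x
  by_cases h : occ.contains x <;> simp [h]

lemma occurencesA_keys (cnf : List (List Int)) :
    (occurencesA cnf).keys = PySem.Set.ofList cnf.flatten := by
  unfold occurencesA
  rw [← List.foldl_flatten, occ_step_eq, PySem.Dict.keys_foldl_insert]
  simp [PySem.Set.update_nil_left]

lemma occurencesA_nodup (cnf : List (List Int)) : (occurencesA cnf).keys.Nodup := by
  unfold occurencesA
  rw [← List.foldl_flatten, occ_step_eq]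
  exact PySem.Dict.nodup_keys_foldl_insert _ _ _ (by simp)

lemma occurencesA_contains (cnf : List (List Int)) (y : Int) :
    (occurencesA cnf).contains y = decide (y ∈ cnf.flatten) := by
  rw [PySem.Dict.contains_eq_decide_mem_keys, occurencesA_keys]
  simp [PySem.Set.mem_ofList]

-- B's literal scan builds exactly set(flattened cnf) in first-appearance order
lemma lits_eq (cnf : List (List Int)) :
    cnf.foldl (fun s clause => PySem.Set.update s clause) PySem.Set.empty
      = PySem.Set.ofList cnf.flatten := by
  rw [PySem.Set.ofList_eq_foldl, List.foldl_flatten]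
  rfl

-- A's pure-literal collection equals B's filter over the literal set
lemma pures_eq (cnf : List (List Int)) :
    (occurencesA cnf).items.foldl
      (fun acc xt => if ¬ (occurencesA cnf).contains (-xt.1) then acc ++ [xt.1] else acc) []
    = (PySem.Set.ofList cnf.flatten).filter
        (fun x => !(PySem.Set.contains (PySem.Set.ofList cnf.flatten) (-x))) := by
  rw [PySem.Dict.items_eq_map_keys _ (occurencesA_nodup cnf) 0, List.foldl_map,
      PySem.List.foldl_append_ite_eq_filter
        (p := fun k : Int => ¬ (occurencesA cnf).contains (-k) = true), occurencesA_keys]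
  simp only [List.nil_append]
  apply List.filter_congr
  intro x _
  simp only [occurencesA_contains, PySem.Set.contains_eq_listContains, List.contains_eq_mem,
    PySem.Set.mem_ofList, List.mem_flatten]
  rw [← decide_not, decide_eq_decide]
  simp

-- when -p occurs in no clause, simplify(cnf, p) just drops the clauses containing p
lemma simplifyA_fold (p : Int) :
    ∀ (c : List (List Int)) (acc : List (List Int)), (∀ cl ∈ c, -p ∉ cl) →
    c.foldl (fun acc clause =>
      acc.bind (fun new_cnf =>
        if p ∈ clause then some new_cnf
        else if -p ∈ clause then
          let c := clause.filter (fun x => x ≠ -p)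
          if c.length = 0 then none else some (new_cnf ++ [c])
        else some (new_cnf ++ [clause]))) (some acc)
    = some (acc ++ c.filter (fun cl => !decide (p ∈ cl)))
  | [], acc, _ => by simp
  | clause :: rest, acc, h => by
    have hneg : -p ∉ clause := h clause (by simp)
    by_cases hp : p ∈ clause
    · simpa [hp] using simplifyA_fold p rest acc (fun cl hcl => h cl (by simp [hcl]))
    · simpa [hp, hneg] using simplifyA_fold p rest (acc ++ [clause]) (fun cl hcl => h cl (by simp [hcl]))

lemma simplifyA_eq (c : List (List Int)) (p : Int) (h : ∀ cl ∈ c, -p ∉ cl) :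
    simplifyA c p = some (c.filter (fun cl => !decide (p ∈ cl))) := by
  unfold simplifyA
  simpa using simplifyA_fold p c [] h

-- A's loop `for x in pure_literals: cnf = simplify(cnf, x)` is one filter by all the pure literals
lemma fold_simplify : ∀ (ps : List Int) (c : List (List Int)),
    (∀ p ∈ ps, ∀ cl ∈ c, -p ∉ cl) →
    ps.foldl (fun st x => st.bind (fun c => simplifyA c x)) (some c)
    = some (c.filter (fun cl => ps.all (fun p => !decide (p ∈ cl))))
  | [], c, _ => by simp
  | p :: rest, c, h => by
    simp only [List.foldl_cons, Option.bind_some]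
    rw [simplifyA_eq c p (h p (by simp))]
    rw [fold_simplify rest _ (fun r hr cl hcl => h r (by simp [hr]) cl (List.mem_of_mem_filter hcl))]
    rw [List.filter_filter]
    congr 1
    apply List.filter_congr
    intro cl _
    simp [Bool.and_comm]

-- ===== VERDICT (by name: the statement is the Claim_ definition above) =====
theorem pure_literal_spec : Claim_equal_pure_literal := by
  intro cnf _
  unfold Spec_pure_literal pure_literal pure_literal_alt
  simp only [lits_eq, pures_eq]
  set L := PySem.Set.ofList cnf.flatten with hL
  set ps := L.filter (fun x => !(PySem.Set.contains L (-x))) with hps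
  have hpure : ∀ p ∈ ps, ∀ cl ∈ cnf, -p ∉ cl := by
    intro p hp cl hcl hmem
    have := List.of_mem_filter hp
    simp only [PySem.Set.contains_eq_listContains, List.contains_eq_mem, Bool.not_eq_true',
      decide_eq_false_iff_not, hL, PySem.Set.mem_ofList] at this
    exact this (List.mem_flatten.mpr ⟨cl, hcl, hmem⟩)
  rw [fold_simplify ps cnf hpure]
  simp only [Option.getD_some, Prod.mk.injEq, and_true]
  apply List.filter_congr
  intro cl _
  rw [Bool.eq_iff_iff]
  simp [List.all_eq_true, PySem.Set.isdisjoint_iff, PySem.Set.mem_ofList]
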